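-- pv_equiv track=rewrite | github.com/0Desom0/Desom-OlivaDice-Plugin | 娱乐/TexasHoldem/function.py | order_best5_by_compact
-- ===== SOURCE A (Python) =====
-- from typing import Dict, List, Optional, Tuple
--
-- def _card_rank_show(card: str) -> str:
--     """把单张牌的点数统一为展示格式（T->10）。"""
--     try:
--         r = str(card)[1]
--     except Exception:
--         return ''
--     return '10' if r == 'T' else str(r)
--
-- def _split_compact_ranks(compact: str) -> List[str]:
--     """把紧凑点数串拆成点数 token 列表（支持 10）。"""
--     s = str(compact or '')
--     out: List[str] = []
--     i = 0
--     while i < len(s):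
--         if s.startswith('10', i):
--             out.append('10')
--             i += 2
--         else:
--             out.append(s[i])
--             i += 1
--     return out
--
-- def order_best5_by_compact(best5: List[str], compact: str) -> List[str]:
--     """按 format_best5_compact 给出的点数顺序，对 best5 进行重排。
--     说明：best5 本身包含正确的 5 张牌，但其顺序可能不符合展示规则。
--     这里用 compact 的点数序列作为目标顺序，在 best5 中按点数逐个匹配取出。
--     """
--     try:
--         tokens = _split_compact_ranks(compact)
--         if not best5 or len(best5) != 5 or len(tokens) != 5:
--             return list(best5) if best5 else []
--
--         remaining = list(best5)
--         ordered: List[str] = []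
--         for t in tokens:
--             hit_idx = None
--             for i, c in enumerate(remaining):
--                 if _card_rank_show(c) == t:
--                     hit_idx = i
--                     break
--             if hit_idx is None:
--                 # 理论上不应发生；兜底返回原顺序
--                 return list(best5)
--             ordered.append(remaining.pop(hit_idx))
--
--         return ordered
--     except Exception:
--         return list(best5) if best5 else []
-- ===== SOURCE B (Python) =====
-- from typing import List
--
-- def _card_rank_show(card: str) -> str:
--     try:
--         r = str(card)[1]
--     except Exception:
--         return ''
--     return '10' if r == 'T' else str(r)
--
-- def _split_compact_ranks(compact: str) -> List[str]:
--     s = str(compact or '')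
--     out: List[str] = []
--     i = 0
--     while i < len(s):
--         if s.startswith('10', i):
--             out.append('10')
--             i += 2
--         else:
--             out.append(s[i])
--             i += 1
--     return out
--
-- def order_best5_by_compact(best5: List[str], compact: str) -> List[str]:
--     """Counting-sort style placement: precompute, per displayed rank, the list of
--     token positions where it must appear; then place each card of best5 directly
--     into its output slot (the j-th card of a rank goes to that rank's j-th token
--     position).  A rank-multiset mismatch surfaces as a card with no slot left,
--     giving the same fallback (original order) as the greedy scan."""
--     tokens = _split_compact_ranks(compact)
--     if not best5 or len(best5) != 5 or len(tokens) != 5: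
--         return list(best5) if best5 else []
--     positions = {}
--     for p, t in enumerate(tokens):
--         positions.setdefault(t, []).append(p)
--     out = [None] * 5
--     seen = {}
--     for c in best5:
--         r = _card_rank_show(c)
--         j = seen.get(r, 0)
--         seen[r] = j + 1
--         slots = positions.get(r, [])
--         if j >= len(slots):
--             return list(best5)
--         out[slots[j]] = c
--     return out
-- ===== Notes on version B (the rewrite author's own statement) =====
-- stated objective: alternative
-- what changed: B inverts the matching: instead of consuming tokens and greedily scanning/removing cards from a shrinking remaining list, it precomputes each rank's token positions once and places each card directly into its output slot (counting-sort style placement by occurrence index), detecting the rank-multiset mismatch fallback via occurrence counts.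
import Mathlib
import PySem

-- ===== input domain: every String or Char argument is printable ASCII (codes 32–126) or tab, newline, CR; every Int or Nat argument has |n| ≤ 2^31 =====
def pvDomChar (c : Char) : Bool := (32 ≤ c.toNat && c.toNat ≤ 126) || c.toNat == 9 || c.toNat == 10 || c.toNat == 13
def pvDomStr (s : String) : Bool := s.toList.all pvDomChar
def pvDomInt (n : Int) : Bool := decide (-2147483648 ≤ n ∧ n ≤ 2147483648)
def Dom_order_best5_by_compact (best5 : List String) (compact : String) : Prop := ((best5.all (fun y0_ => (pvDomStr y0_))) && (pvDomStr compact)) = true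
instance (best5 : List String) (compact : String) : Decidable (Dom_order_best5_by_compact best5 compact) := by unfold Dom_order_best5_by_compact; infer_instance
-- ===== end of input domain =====

-- B replaces A's greedy token-by-token scan-and-remove over a shrinking remaining list by a
-- counting-sort style placement: it precomputes each rank's token positions once and writes each
-- card of best5 directly into its output slot (alternative decomposition; same cost at the fixed size 5).
-- A's try/except is dead code (nothing in its body can raise: the helper catches its own IndexError), so it is not ported.

-- ===== PORT A =====
-- _card_rank_show: str(card)[1] (IndexError → ''), 'T' shown as '10'  (helper shared by both ports)
def rankShow (card : String) : String :=
  match PySem.Str.pyGet? card 1 with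
  | none => ""                                   -- the except branch
  | some r => if r == 'T' then "10" else String.ofList [r]

-- _split_compact_ranks: the index-advancing while loop as structural recursion on the chars  (shared helper)
def splitRanks : List Char → List String
  | '1' :: '0' :: rest => "10" :: splitRanks rest
  | c :: rest => String.ofList [c] :: splitRanks rest
  | [] => []

-- inner 'for i, c in enumerate(remaining): … break' producing hit_idx
def scanHit (t : String) : List String → Option Nat
  | [] => none
  | c :: rest => if rankShow c == t then some 0 else (scanHit t rest).map (· + 1)

-- outer 'for t in tokens' loop over (remaining, ordered)
def loopA (best5 : List String) : List String → List String → List String → List String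
  | [], _, ordered => ordered
  | t :: ts, remaining, ordered =>
    match scanHit t remaining with
    | none => best5                              -- 兜底: return list(best5)
    | some i =>
      match PySem.List.pop? remaining (i : Int) with
      | none => best5                            -- unreachable: scanHit yields an in-range index
      | some (c, rest) => loopA best5 ts rest (ordered ++ [c])

def order_best5_by_compact (best5 : List String) (compact : String) : List String :=
  let tokens := splitRanks compact.toList
  if best5 = [] || best5.length ≠ 5 || tokens.length ≠ 5 then
    if best5 ≠ [] then best5 else []
  else
    loopA best5 tokens best5 []

-- ===== PORT B =====
-- positions.setdefault(t, []).append(p) over enumerate(tokens): rank -> its token positions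
def buildPositions (tokens : List String) : PySem.Dict String (List Int) :=
  (PySem.List.enumerate tokens).foldl (fun d pt => d.modify pt.2 [] (· ++ [pt.1])) PySem.Dict.empty

-- 'for c in best5' placing each card at its rank's next token position; out is the
-- [None]*5 cell list (pySetD is exact here: the written index comes from enumerate, 0 ≤ p < 5)
def loopB (best5 : List String) (positions : PySem.Dict String (List Int)) :
    List String → List (Option String) → PySem.Dict String Int → List String
  | [], out, _ => out.map (fun o => o.getD "")   -- success: every cell holds a card (proved below), the default is never used
  | c :: cs, out, seen =>
    let r := rankShow c
    let j := seen.getD r 0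
    let seen' := seen.insert r (j + 1)
    let slots := positions.getD r []
    if j ≥ (slots.length : Int) then best5        -- rank-multiset mismatch: return list(best5)
    else
      match PySem.List.pyGet? slots j with
      | none => best5                             -- unreachable: 0 ≤ j < len(slots)
      | some p => loopB best5 positions cs (PySem.List.pySetD out p (some c)) seen'

def order_best5_by_compact_alt (best5 : List String) (compact : String) : List String :=
  let tokens := splitRanks compact.toList
  if best5 = [] || best5.length ≠ 5 || tokens.length ≠ 5 then
    if best5 ≠ [] then best5 else []
  else
    loopB best5 (buildPositions tokens) best5 (List.replicate 5 none) PySem.Dict.empty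

-- ===== PRECONDITION & SPEC =====
def Spec_order_best5_by_compact (best5 : List String) (compact : String) (out : List String) : Prop := out = order_best5_by_compact_alt best5 compact
instance (best5 : List String) (compact : String) (out : List String) : Decidable (Spec_order_best5_by_compact best5 compact out) := by unfold Spec_order_best5_by_compact; infer_instance

-- ===== CLAIM (what is proved, stated in full; the proofs are below) =====
def Claim_equal_order_best5_by_compact : Prop := ∀ (best5 : List String) (compact : String), Dom_order_best5_by_compact best5 compact → Spec_order_best5_by_compact best5 compact (order_best5_by_compact best5 compact)

-- ===== LEMMAS AND PROOFS =====

-- proof-only: remove the first card of displayed rank t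
def rmFirst (t : String) : List String → List String
  | [] => []
  | c :: rest => if rankShow c == t then rest else c :: rmFirst t rest

-- proof-only: what A's loop produces on success
def extract : List String → List String → List String
  | [], _ => []
  | t :: ts, rem => (rem.filter (fun c => rankShow c == t)).headD "" :: extract ts (rmFirst t rem)

-- proof-only: positions of rank r inside ts (Nat version of the dict's buckets)
def posN (r : String) : List String → List Nat
  | [] => []
  | t :: ts => if t == r then 0 :: (posN r ts).map (· + 1) else (posN r ts).map (· + 1)

-- proof-only: the common value both loops compute on success
def target (best5 tokens : List String) : List String :=
  (List.range tokens.length).map (fun q =>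
    (best5.filter (fun c => rankShow c == tokens.getD q "")).getD
      ((tokens.take q).count (tokens.getD q "")) "")

theorem scanHit_none_iff (t : String) (rem : List String) :
    scanHit t rem = none ↔ rem.filter (fun c => rankShow c == t) = [] := by
  induction rem with
  | nil => simp [scanHit]
  | cons x rest ih =>
    by_cases hx : rankShow x == t
    · simp [scanHit, hx]
    · simp [scanHit, hx, ih]

theorem scanHit_pop (t : String) : ∀ (rem : List String) (c : String) (l : List String),
    rem.filter (fun x => rankShow x == t) = c :: l →
    ∃ i : Nat, i < rem.length ∧ scanHit t rem = some i ∧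
      PySem.List.pop? rem (i : Int) = some (c, rmFirst t rem) := by
  intro rem
  induction rem with
  | nil => intro c l h; simp at h
  | cons x rest ih =>
    intro c l h
    by_cases hx : rankShow x == t
    · refine ⟨0, by simp, by simp [scanHit, hx], ?_⟩
      have hc : c = x := by simp [hx] at h; exact h.1.symm
      simp [PySem.List.pop?_zero_cons, rmFirst, hx, hc]
    · have h' : rest.filter (fun x => rankShow x == t) = c :: l := by
        simpa [hx] using h
      obtain ⟨i, hlt, hs, hp⟩ := ih c l h'
      refine ⟨i + 1, by simp; omega, by simp [scanHit, hx, hs], ?_⟩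
      rw [PySem.List.pop?_natCast (x :: rest) (i + 1) (by simp; omega)]
      rw [PySem.List.pop?_natCast rest i hlt] at hp
      have h1 : rest[i] = c := by simpa using congrArg (fun o => o.map Prod.fst) hp
      have h2 : rest.eraseIdx i = rmFirst t rest := by
        simpa using congrArg (fun o => o.map Prod.snd) hp
      simp [rmFirst, hx, h1, h2]

theorem rmFirst_filter (t r : String) (rem : List String) :
    (rmFirst t rem).filter (fun c => rankShow c == r) =
      if r = t then (rem.filter (fun c => rankShow c == t)).tail
      else rem.filter (fun c => rankShow c == r) := by
  induction rem with
  | nil => simp [rmFirst]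
  | cons x rest ih =>
    by_cases hx : rankShow x == t
    · have hxt : rankShow x = t := by simpa using hx
      by_cases hr : r = t
      · subst hr; simp [rmFirst, hxt]
      · have hxr : ¬ (rankShow x == r) := by simp [hxt]; exact fun h => hr h.symm
        simp [rmFirst, hx, hxr, hr]
    · by_cases hr : r = t
      · subst hr
        simp [rmFirst, hx, ih]
      · simp [rmFirst, hx, List.filter_cons, ih, hr]

-- A's loop succeeds and produces extract when every token rank is still available
theorem loopA_extract (best5 : List String) : ∀ (tokens rem acc : List String),
    (∀ r, tokens.count r ≤ (rem.filter (fun c => rankShow c == r)).length) →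
    loopA best5 tokens rem acc = acc ++ extract tokens rem := by
  intro tokens
  induction tokens with
  | nil => intro rem acc _; simp [loopA, extract]
  | cons t ts ih =>
    intro rem acc hle
    have h1 : 1 ≤ (rem.filter (fun c => rankShow c == t)).length := by
      have := hle t; simp [List.count_cons] at this; omega
    cases hfil : rem.filter (fun c => rankShow c == t) with
    | nil => rw [hfil] at h1; simp at h1
    | cons c l =>
      obtain ⟨i, _, hs, hp⟩ := scanHit_pop t rem c l hfil
      have hstep : loopA best5 (t :: ts) rem acc = loopA best5 ts (rmFirst t rem) (acc ++ [c]) := by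
        simp [loopA, hs, hp]
      rw [hstep, ih (rmFirst t rem) (acc ++ [c]) ?_]
      · simp [extract, hfil, List.append_assoc]
      · intro r
        rw [rmFirst_filter]
        by_cases hr : r = t
        · subst hr
          have := hle r
          simp [List.count_cons, hfil] at *
          omega
        · have := hle r
          simp [hr, List.count_cons, show ¬ (t == r) by simpa using fun h => hr h.symm] at *
          omega

-- A's loop falls back to best5 when some token rank is over-demanded
theorem loopA_fail (best5 : List String) : ∀ (tokens rem acc : List String) (r : String),
    (rem.filter (fun c => rankShow c == r)).length < tokens.count r →
    loopA best5 tokens rem acc = best5 := by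
  intro tokens
  induction tokens with
  | nil => intro rem acc r h; simp at h
  | cons t ts ih =>
    intro rem acc r h
    cases hfil : rem.filter (fun c => rankShow c == t) with
    | nil =>
      have hs : scanHit t rem = none := (scanHit_none_iff t rem).2 hfil
      simp [loopA, hs]
    | cons c l =>
      obtain ⟨i, _, hs, hp⟩ := scanHit_pop t rem c l hfil
      have hstep : loopA best5 (t :: ts) rem acc = loopA best5 ts (rmFirst t rem) (acc ++ [c]) := by
        simp [loopA, hs, hp]
      rw [hstep]
      by_cases hr : r = t
      · subst hr
        exact ih _ _ r (by rw [rmFirst_filter]; simp [List.count_cons, hfil] at *; omega)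
      · exact ih _ _ r (by
          rw [rmFirst_filter]
          simp [hr, List.count_cons, show ¬ (t == r) by simpa using fun h => hr h.symm] at *
          omega)

-- extract, elementwise: the p-th output is the (count-before)-th card of rank tokens[p]
theorem extract_eq_target : ∀ (tokens rem : List String), extract tokens rem = target rem tokens := by
  intro tokens
  induction tokens with
  | nil => intro rem; simp [extract, target]
  | cons t ts ih =>
    intro rem
    have hrange : List.range (ts.length + 1) = 0 :: (List.range ts.length).map (· + 1) := by
      simpa [Function.comp] using congrArg (List.map id) (List.range_succ_eq_map (n := ts.length))
    simp only [target, List.length_cons, hrange, List.map_cons, List.map_map]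
    simp only [extract, ih (rmFirst t rem)]
    refine List.cons_eq_cons.mpr ⟨?_, ?_⟩
    · simp only [List.getD_cons_zero, List.take_zero, List.count_nil]
      cases rem.filter (fun c => rankShow c == t) <;> simp
    · unfold target
      apply List.map_congr_left
      intro q hq
      simp only [Function.comp]
      rw [rmFirst_filter]
      simp only [List.getD_cons_succ, List.take_succ_cons, List.count_cons]
      by_cases hr : ts.getD q "" = t
      · rw [hr]
        simp only [if_pos rfl, beq_self_eq_true, if_pos]
        cases hfil : rem.filter (fun c => rankShow c == t) with
        | nil => simp
        | cons c l => simp [List.getD_cons_succ]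
      · have hr' : ts[q]?.getD "" ≠ t := by simpa [List.getD] using hr
        simp [hr', Ne.symm hr']

-- posN facts
theorem posN_length (r : String) : ∀ ts : List String, (posN r ts).length = ts.count r := by
  intro ts
  induction ts with
  | nil => simp [posN]
  | cons t ts ih =>
    by_cases ht : t == r <;> simp [posN, ht, List.count_cons, ih]

theorem posN_spec (r : String) : ∀ (ts : List String) (j : Nat) (hj : j < (posN r ts).length),
    (posN r ts)[j] < ts.length ∧ ts.getD ((posN r ts)[j]) "" = r ∧
      (ts.take ((posN r ts)[j])).count r = j := by
  intro ts
  induction ts with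
  | nil => intro j hj; simp [posN] at hj
  | cons t ts ih =>
    intro j hj
    by_cases ht : t == r
    · match j with
      | 0 => simpa [posN, ht] using eq_of_beq ht
      | j + 1 =>
        simp only [posN, if_pos ht] at hj ⊢
        rw [List.getElem_cons_succ, List.getElem_map]
        have hj' : j < (posN r ts).length := by simpa using hj
        obtain ⟨h1, h2, h3⟩ := ih j hj'
        refine ⟨by simpa using h1, by simpa using h2, ?_⟩
        simp [List.count_cons, ht, h3]
    · simp only [posN, if_neg ht] at hj ⊢
      rw [List.getElem_map]
      have hj' : j < (posN r ts).length := by simpa using hj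
      obtain ⟨h1, h2, h3⟩ := ih j hj'
      refine ⟨by simpa using h1, by simpa using h2, ?_⟩
      simp [List.count_cons, ht, h3]

theorem posN_unique (r : String) : ∀ (ts : List String) (q : Nat), q < ts.length →
    ts.getD q "" = r →
    ∃ hj : (ts.take q).count r < (posN r ts).length, (posN r ts)[(ts.take q).count r] = q := by
  intro ts
  induction ts with
  | nil => intro q hq _; simp at hq
  | cons t ts ih =>
    intro q hq hr
    match q with
    | 0 =>
      have ht : t == r := by have : t = r := by simpa using hr
                             simp [this]
      exact ⟨by simp [posN, ht], by simp [posN, ht]⟩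
    | q + 1 =>
      have hq' : q < ts.length := by simpa using hq
      have hr' : ts.getD q "" = r := by simpa using hr
      obtain ⟨hj, hval⟩ := ih q hq' hr'
      by_cases ht : t == r
      · have hc : ((t :: ts).take (q+1)).count r = (ts.take q).count r + 1 := by
          simp [List.count_cons, ht]
        refine ⟨by rw [hc]; simp only [posN, if_pos ht, List.length_cons, List.length_map]; omega, ?_⟩
        simp only [posN, if_pos ht, hc, List.getElem_cons_succ, List.getElem_map, hval]
      · have hc : ((t :: ts).take (q+1)).count r = (ts.take q).count r := by
          simp [List.count_cons, ht]
        refine ⟨by rw [hc]; simp only [posN, if_neg ht, List.length_map]; omega, ?_⟩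
        simp only [posN, if_neg ht, hc, List.getElem_map, hval]

-- the enumerate-filter view of posN
theorem enum_filter_posN (r : String) : ∀ (ts : List String) (k : Int),
    (((PySem.List.enumerate ts k).map (fun pt => (pt.2, pt.1))).filter
        (fun p => p.1 == r)).map (fun p => p.2)
      = (posN r ts).map (fun n : Nat => k + (n : Int)) := by
  intro ts
  induction ts with
  | nil => intro k; simp [PySem.List.enumerate_nil, posN]
  | cons t ts ih =>
    intro k
    rw [PySem.List.enumerate_cons]
    by_cases ht : t == r
    · simp only [List.map_cons, List.filter_cons, ht, cond_true, posN, if_pos ht,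
        List.map_cons]
      refine List.cons_eq_cons.mpr ⟨by simp, ?_⟩
      rw [ih (k + 1), List.map_map]
      apply List.map_congr_left
      intro n _
      simp only [Function.comp_apply]
      push_cast; ring
    · simp only [List.map_cons, List.filter_cons, ht, posN, if_neg ht, Bool.false_eq_true, if_false]
      rw [ih (k + 1), List.map_map]
      apply List.map_congr_left
      intro n _
      simp only [Function.comp_apply]
      push_cast; ring

-- the dict of buckets is posN (cast to Int)
theorem buildPositions_getD (tokens : List String) (r : String) :
    (buildPositions tokens).getD r [] = (posN r tokens).map (fun n : Nat => (n : Int)) := by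
  have h : buildPositions tokens
      = ((PySem.List.enumerate tokens).map (fun pt => (pt.2, pt.1))).foldl
          (fun d p => d.modify p.1 [] (· ++ [p.2])) PySem.Dict.empty := by
    rw [List.foldl_map]; rfl
  rw [h, PySem.Dict.getD_foldl_modify_append, enum_filter_posN]
  simp

-- getD-level list facts used by the placement invariant
theorem getD_append_left {α : Type} (l l' : List α) (i : Nat) (d : α) (h : i < l.length) :
    (l ++ l').getD i d = l.getD i d := by
  simp [List.getD, List.getElem?_append_left h]

theorem getD_append_len {α : Type} (l : List α) (c d : α) :
    (l ++ [c]).getD l.length d = c := by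
  simp [List.getD, List.getElem?_append_right (le_refl l.length)]

theorem getD_set_self {α : Type} (l : List α) (n : Nat) (v d : α) (h : n < l.length) :
    (l.set n v).getD n d = v := by
  simp [List.getD, List.getElem?_set_self, h]

theorem getD_set_ne {α : Type} (l : List α) (n q : Nat) (v d : α) (h : n ≠ q) :
    (l.set n v).getD q d = l.getD q d := by
  simp [List.getD, List.getElem?_set_ne h]

-- filt of pre ++ [c] at rank c
theorem filter_snoc_self (pre : List String) (c : String) (r : String) (hr : rankShow c = r) :
    (pre ++ [c]).filter (fun x => rankShow x == r) =
      pre.filter (fun x => rankShow x == r) ++ [c] := by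
  simp [List.filter_append, hr]

theorem filter_snoc_ne (pre : List String) (c : String) (r : String) (hr : rankShow c ≠ r) :
    (pre ++ [c]).filter (fun x => rankShow x == r) = pre.filter (fun x => rankShow x == r) := by
  simp [List.filter_append, hr]

-- B's loop, fallback case: some rank has more cards than token slots
theorem loopB_fail (best5 tokens : List String) (r0 : String)
    (hbad : tokens.count r0 < (best5.filter (fun c => rankShow c == r0)).length) :
    ∀ (cs pre : List String) (out : List (Option String)) (seen : PySem.Dict String Int),
    best5 = pre ++ cs →
    (∀ r, seen.getD r 0 = ((pre.filter (fun c => rankShow c == r)).length : Int)) →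
    (pre.filter (fun c => rankShow c == r0)).length ≤ tokens.count r0 →
    loopB best5 (buildPositions tokens) cs out seen = best5 := by
  intro cs
  induction cs with
  | nil =>
    intro pre out seen hpre hseen hle
    rw [hpre] at hbad; simp at hbad; omega
  | cons c cs ih =>
    intro pre out seen hpre hseen hle
    have hslen : ((buildPositions tokens).getD (rankShow c) []).length
        = tokens.count (rankShow c) := by
      rw [buildPositions_getD]; simp [posN_length]
    by_cases hguard : seen.getD (rankShow c) 0 ≥ (((buildPositions tokens).getD (rankShow c) []).length : Int)
    · simp only [loopB, if_pos hguard]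
    · have hjlt : (pre.filter (fun x => rankShow x == rankShow c)).length
          < tokens.count (rankShow c) := by
        have := hseen (rankShow c); rw [this, hslen] at hguard; exact_mod_cast not_le.mp hguard
      have hget : PySem.List.pyGet? ((buildPositions tokens).getD (rankShow c) [])
            (seen.getD (rankShow c) 0)
          = some (((posN (rankShow c) tokens)[(pre.filter (fun x => rankShow x == rankShow c)).length]'(by rw [posN_length]; exact hjlt) : Nat) : Int) := by
        rw [hseen (rankShow c), PySem.List.pyGet?_natCast, buildPositions_getD]
        simp [List.getElem?_map, List.getElem?_eq_getElem (by rw [posN_length]; exact hjlt)]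
      simp only [loopB, if_neg hguard, hget]
      apply ih (pre ++ [c]) _ _ (by simp [hpre])
      · intro r
        rw [PySem.Dict.getD_insert]
        by_cases hr : rankShow c = r
        · subst hr
          simp [filter_snoc_self pre c _ rfl, hseen (rankShow c)]
        · rw [filter_snoc_ne pre c r hr]
          simp [hseen r]
          exact fun h => absurd h.symm hr
      · by_cases hr : rankShow c = r0
        · subst hr; rw [filter_snoc_self pre c _ rfl]; simp; omega
        · rw [filter_snoc_ne pre c r0 hr]; exact hle

-- B's loop, success case: the invariant and the final value
theorem loopB_success (best5 tokens : List String)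
    (hC : ∀ r, tokens.count r = (best5.filter (fun c => rankShow c == r)).length) :
    ∀ (cs pre : List String) (out : List (Option String)) (seen : PySem.Dict String Int),
    best5 = pre ++ cs →
    (∀ r, seen.getD r 0 = ((pre.filter (fun c => rankShow c == r)).length : Int)) →
    out.length = tokens.length →
    (∀ q, q < tokens.length →
      out.getD q none =
        (if (tokens.take q).count (tokens.getD q "") <
            (pre.filter (fun c => rankShow c == tokens.getD q "")).length
         then some ((pre.filter (fun c => rankShow c == tokens.getD q "")).getD
                     ((tokens.take q).count (tokens.getD q "")) "")
         else none)) →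
    loopB best5 (buildPositions tokens) cs out seen = target best5 tokens := by
  intro cs
  induction cs with
  | nil =>
    intro pre out seen hpre hseen hlen hout
    have hpre' : pre = best5 := by simpa using hpre.symm
    subst hpre'
    simp only [loopB]
    apply List.ext_getElem
    · simp [target, hlen]
    · intro q hq1 hq2
      have hq : q < tokens.length := by simpa [hlen] using hq1
      have hq1' : q < out.length := by simpa using hq1
      have htq : tokens[q] = tokens.getD q "" := by
        simp [List.getD, List.getElem?_eq_getElem hq]
      have hcnt : (tokens.take q).count (tokens.getD q "") <
          (pre.filter (fun c => rankShow c == tokens.getD q "")).length := by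
        rw [← hC]
        have h1 : (tokens.take (q+1)).count (tokens.getD q "")
            = (tokens.take q).count (tokens.getD q "") + 1 := by
          rw [List.take_succ, List.getElem?_eq_getElem hq, List.count_append]
          simp [htq]
        have h2 : (tokens.take (q+1)).count (tokens.getD q "") ≤ tokens.count (tokens.getD q "") :=
          (List.take_sublist _ _).count_le _
        omega
      have hqe := hout q hq
      rw [if_pos hcnt] at hqe
      have hoq : out[q]'hq1' = some ((pre.filter (fun c => rankShow c == tokens.getD q "")).getD
          ((tokens.take q).count (tokens.getD q "")) "") := by
        rw [← hqe]; simp [List.getD, List.getElem?_eq_getElem hq1']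
      simp only [List.getElem_map, hoq, Option.getD_some, target]
      simp [List.getElem_range]
  | cons c cs ih =>
    intro pre out seen hpre hseen hlen hout
    have hjlt : (pre.filter (fun x => rankShow x == rankShow c)).length
        < tokens.count (rankShow c) := by
      rw [hC, hpre, List.filter_append]
      simp [List.count_cons]
    have hjlt' : (pre.filter (fun x => rankShow x == rankShow c)).length
        < (posN (rankShow c) tokens).length := by rw [posN_length]; exact hjlt
    have hslen : ((buildPositions tokens).getD (rankShow c) []).length
        = tokens.count (rankShow c) := by
      rw [buildPositions_getD]; simp [posN_length]
    have hguard : ¬ seen.getD (rankShow c) 0 ≥ (((buildPositions tokens).getD (rankShow c) []).length : Int) := by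
      rw [hseen (rankShow c), hslen]; push_neg; exact_mod_cast hjlt
    have hget : PySem.List.pyGet? ((buildPositions tokens).getD (rankShow c) [])
          (seen.getD (rankShow c) 0)
        = some ((((posN (rankShow c) tokens)[(pre.filter (fun x => rankShow x == rankShow c)).length]'hjlt' : Nat)) : Int) := by
      rw [hseen (rankShow c), PySem.List.pyGet?_natCast, buildPositions_getD]
      simp [List.getElem?_map, List.getElem?_eq_getElem hjlt']
    obtain ⟨hplt, hpr, hpcount⟩ := posN_spec (rankShow c) tokens _ hjlt'
    simp only [loopB, if_neg hguard, hget, PySem.List.pySetD_natCast]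
    apply ih (pre ++ [c]) _ _ (by simp [hpre])
    · intro r
      rw [PySem.Dict.getD_insert]
      by_cases hr : rankShow c = r
      · subst hr
        simp [filter_snoc_self pre c _ rfl, hseen (rankShow c)]
      · rw [filter_snoc_ne pre c r hr]
        simp [hseen r]
        exact fun h => absurd h.symm hr
    · simpa using hlen
    · intro q hq
      by_cases hqp : q = (posN (rankShow c) tokens)[(pre.filter (fun x => rankShow x == rankShow c)).length]'hjlt'
      · subst hqp
        rw [getD_set_self _ _ _ _ (by rw [hlen]; exact hplt)]
        rw [hpr, hpcount, filter_snoc_self pre c _ rfl]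
        rw [if_pos (by simp)]
        rw [getD_append_len]
      · rw [getD_set_ne _ _ _ _ _ (fun h => hqp h.symm)]
        rw [hout q hq]
        by_cases hr : tokens.getD q "" = rankShow c
        · rw [hr, filter_snoc_self pre c _ rfl]
          have hne : (tokens.take q).count (rankShow c)
              ≠ (pre.filter (fun x => rankShow x == rankShow c)).length := by
            intro heq
            obtain ⟨hj2, hval2⟩ := posN_unique (rankShow c) tokens q hq hr
            apply hqp
            rw [← hval2]
            simp only [heq]
          by_cases hlt : (tokens.take q).count (rankShow c)
              < (pre.filter (fun x => rankShow x == rankShow c)).length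
          · rw [if_pos hlt, if_pos (by simp; omega), getD_append_left _ _ _ _ hlt]
          · rw [if_neg hlt, if_neg (by simp; omega)]
        · rw [filter_snoc_ne pre c _ (fun h => hr h.symm)]

-- count over the rank image = length of the rank filter
theorem count_map_rankShow (r : String) : ∀ l : List String,
    (l.map rankShow).count r = (l.filter (fun c => rankShow c == r)).length := by
  intro l
  induction l with
  | nil => simp
  | cons c l ih =>
    by_cases hc : rankShow c == r <;> simp [List.count_cons, List.filter_cons, hc, ih]

-- ===== VERDICT (by name: the statement is the Claim_ definition above) =====
theorem order_best5_by_compact_spec : Claim_equal_order_best5_by_compact := by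
  intro best5 compact _
  unfold Spec_order_best5_by_compact order_best5_by_compact order_best5_by_compact_alt
  by_cases hg : best5 = [] ∨ best5.length ≠ 5 ∨ (splitRanks compact.toList).length ≠ 5
  · rcases hg with h | h | h <;> simp [h]
  · push_neg at hg
    obtain ⟨h1, h2, h3⟩ := hg
    set tokens := splitRanks compact.toList with htok
    simp [h1, h2, h3]
    by_cases hC : ∀ r : String, tokens.count r = (best5.filter (fun c => rankShow c == r)).length
    · rw [loopA_extract best5 tokens best5 [] (fun r => le_of_eq (hC r)), extract_eq_target]
      rw [loopB_success best5 tokens hC best5 [] [none, none, none, none, none] PySem.Dict.empty rfl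
        (by intro r; rfl)
        (by simp [h3])
        (by intro q hq; rcases q with _ | _ | _ | _ | _ | q <;> simp [List.getD])]
      simp
    · have hlenR : (best5.map rankShow).length = tokens.length := by simp [h2, h3]
      have hA : ∃ r, (best5.filter (fun c => rankShow c == r)).length < tokens.count r := by
        by_contra hno
        push_neg at hno
        have hsub : List.Subperm tokens (best5.map rankShow) := by
          rw [List.subperm_ext_iff]
          intro x _
          rw [count_map_rankShow]; exact hno x
        have hperm := hsub.perm_of_length_le (le_of_eq hlenR)
        exact hC (fun r => by rw [List.perm_iff_count.mp hperm r, count_map_rankShow])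
      have hB : ∃ r, tokens.count r < (best5.filter (fun c => rankShow c == r)).length := by
        by_contra hno
        push_neg at hno
        have hsub : List.Subperm (best5.map rankShow) tokens := by
          rw [List.subperm_ext_iff]
          intro x _
          rw [count_map_rankShow]; exact hno x
        have hperm := hsub.perm_of_length_le (le_of_eq hlenR.symm)
        exact hC (fun r => by rw [← List.perm_iff_count.mp hperm r, count_map_rankShow])
      obtain ⟨rA, hrA⟩ := hA
      obtain ⟨rB, hrB⟩ := hB
      rw [loopA_fail best5 tokens best5 [] rA hrA,
        loopB_fail best5 tokens rB hrB best5 [] [none, none, none, none, none] PySem.Dict.empty rfl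
          (by intro r; rfl) (by simp)]
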